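-- pv_equiv track=rewrite | github.com/pinobatch/pyfhbg | chipsfx.py | repr_sfx
-- ===== SOURCE A (Python) =====
-- def repr_sfx(s, noise=False):
--     lines = ["array('B', ["]
--     fmt = "0x%02x,0x%02x," if noise else "0x%02x,%2d,"
--     width = 7 if noise else 8
--     s = iter(s)
--     row = []
--     while True:
--         try:
--             b1 = next(s)
--             b2 = next(s)
--         except StopIteration:
--             break
--         row.append(fmt % (b1, b2))
--         if len(row) >= width:
--             lines.append("    "+"".join(row))
--             row = []
--     if row:
--         lines.append("    "+"".join(row))
--     lines.append("]")
--     return "\n".join(lines)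
-- ===== SOURCE B (Python) =====
-- def repr_sfx(s, noise=False):
--     fmt = "0x%02x,0x%02x," if noise else "0x%02x,%2d,"
--     width = 7 if noise else 8
--     it = iter(s)
--     cells = [fmt % p for p in zip(it, it)]
--     body = []
--     i = 0
--     while i < len(cells):
--         body.append("    " + "".join(cells[i:i+width]))
--         i += width
--     return "\n".join(["array('B', [", *body, "]"])
-- ===== Notes on version B (the rewrite author's own statement) =====
-- stated objective: simpler
-- what changed: Replaces the interleaved while/next/next loop with a row buffer and flush-at-width logic by a two-phase pipeline: pair bytes with zip over one shared iterator into a flat list of formatted cells, then chunk that list into rows by repeated slicing.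
import Mathlib
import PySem

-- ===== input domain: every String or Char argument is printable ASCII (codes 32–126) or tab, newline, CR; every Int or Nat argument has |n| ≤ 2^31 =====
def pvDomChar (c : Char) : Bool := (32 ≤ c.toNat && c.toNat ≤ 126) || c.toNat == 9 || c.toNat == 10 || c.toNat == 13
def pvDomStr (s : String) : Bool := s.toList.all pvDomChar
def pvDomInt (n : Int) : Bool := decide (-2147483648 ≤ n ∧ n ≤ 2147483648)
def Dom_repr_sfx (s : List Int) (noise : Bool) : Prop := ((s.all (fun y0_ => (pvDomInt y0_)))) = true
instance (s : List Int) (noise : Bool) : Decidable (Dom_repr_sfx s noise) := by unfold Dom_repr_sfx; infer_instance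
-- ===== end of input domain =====

-- B replaces A's interleaved pair-and-flush row buffer by a two-phase pipeline (flat cell
-- list, then chunking by slices); objective: simpler. Same return value on every input.

-- shared formatting helpers: the '%' formatting both Pythons apply via the same fmt string
-- hex digits of n (lowercase), most significant first; exact for n : Nat
def pvHexDigits (n : Nat) : List Char :=
  if _h : n < 16 then [Nat.digitChar n]
  else pvHexDigits (n / 16) ++ [Nat.digitChar (n % 16)]
  decreasing_by exact Nat.div_lt_self (by omega) (by omega)

-- "%02x" % n : zero-pad to width 2 (sign counts toward the width, as in CPython)
def pvHex2 (n : Int) : String :=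
  if n < 0 then "-" ++ String.mk (pvHexDigits (-n).toNat)
  else
    let h := pvHexDigits n.toNat
    String.mk (if h.length < 2 then '0' :: h else h)

-- "%2d" % n : space-pad to width 2
def pvDec2 (n : Int) : String :=
  let cs := (PySem.Int.toStr n).toList
  String.mk (if cs.length < 2 then ' ' :: cs else cs)

-- fmt % (b1, b2) with fmt = "0x%02x,0x%02x," (noise) or "0x%02x,%2d," (pitched)
def pvFmtCell (noise : Bool) (b1 b2 : Int) : String :=
  if noise then "0x" ++ pvHex2 b1 ++ ",0x" ++ pvHex2 b2 ++ ","
  else "0x" ++ pvHex2 b1 ++ "," ++ pvDec2 b2 ++ ","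

-- ===== PORT A =====
-- the while True / next / next loop with row buffer: two elements consumed per step,
-- an unpaired trailing element is dropped (StopIteration on the second next)
def reprLoopA (noise : Bool) (width : Nat) : List Int → List String → List String → List String
  | b1 :: b2 :: rest, row, lines =>
    let row' := row ++ [pvFmtCell noise b1 b2]
    if width ≤ row'.length then
      reprLoopA noise width rest [] (lines ++ ["    " ++ PySem.Str.join "" row'])
    else
      reprLoopA noise width rest row' lines
  | _, row, lines =>
    if row.isEmpty then lines else lines ++ ["    " ++ PySem.Str.join "" row]

def repr_sfx (s : List Int) (noise : Bool) : String :=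
  let lines := ["array('B', ["]
  let width : Nat := if noise then 7 else 8
  let lines := reprLoopA noise width s [] lines
  PySem.Str.join "\n" (lines ++ ["]"])

-- ===== PORT B =====
-- cells = [fmt % p for p in zip(it, it)] : pair consecutive elements, dropping an odd tail
def pvPairs : List Int → List (Int × Int)
  | b1 :: b2 :: rest => (b1, b2) :: pvPairs rest
  | _ => []

-- the index-advancing loop: while i < len(cells): body.append("    " + "".join(cells[i:i+width])); i += width
-- (first Nat argument is fuel = cells.length + 1, only to make the recursion structural)
def reprChunkB (width : Nat) : Nat → Nat → List String → List String
  | 0, _, _ => []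
  | fuel + 1, i, cells =>
    if i < cells.length then
      ("    " ++ PySem.Str.join "" (PySem.List.slice cells (some (i : Int)) (some ((i + width : Nat) : Int))))
        :: reprChunkB width fuel (i + width) cells
    else []

def repr_sfx_alt (s : List Int) (noise : Bool) : String :=
  let width : Nat := if noise then 7 else 8
  let cells := (pvPairs s).map (fun p => pvFmtCell noise p.1 p.2)
  let body := reprChunkB width (cells.length + 1) 0 cells
  PySem.Str.join "\n" ("array('B', [" :: body ++ ["]"])

-- ===== PRECONDITION & SPEC =====
def Spec_repr_sfx (s : List Int) (noise : Bool) (out : String) : Prop := out = repr_sfx_alt s noise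
instance (s : List Int) (noise : Bool) (out : String) : Decidable (Spec_repr_sfx s noise out) := by unfold Spec_repr_sfx; infer_instance

-- ===== CLAIM (what is proved, stated in full; the proofs are below) =====
def Claim_equal_repr_sfx : Prop := ∀ (s : List Int) (noise : Bool), Dom_repr_sfx s noise → Spec_repr_sfx s noise (repr_sfx s noise)

-- ===== LEMMAS AND PROOFS =====

-- proof-side chunking of a flat cell list, w cells at a time (fuel-driven)
def pvChunks (width : Nat) : Nat → List String → List String
  | _, [] => []
  | 0, _ :: _ => []
  | fuel + 1, c :: cs =>
    ("    " ++ PySem.Str.join "" (List.take width (c :: cs)))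
      :: pvChunks width fuel (List.drop width (c :: cs))

-- the fuel of pvChunks is irrelevant as long as it dominates the list length
lemma pvChunks_fuel (w : Nat) (hw : 0 < w) :
    ∀ f1 f2 (cells : List String), cells.length ≤ f1 → cells.length ≤ f2 →
      pvChunks w f1 cells = pvChunks w f2 cells := by
  intro f1
  induction f1 with
  | zero =>
    intro f2 cells h1 _
    have : cells = [] := List.length_eq_zero_iff.mp (Nat.le_zero.mp h1)
    subst this
    cases f2 <;> simp [pvChunks]
  | succ k ih =>
    intro f2 cells h1 h2
    match cells with
    | [] => cases f2 <;> simp [pvChunks]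
    | c :: cs =>
      match f2 with
      | 0 => exact absurd h2 (by simp)
      | j + 1 =>
        simp only [pvChunks]
        congr 1
        have hlen : ((c :: cs).drop w).length ≤ (c :: cs).length - 1 := by
          simp [List.length_drop]; omega
        exact ih j _ (by simp_all; omega) (by simp_all; omega)

-- A's loop with a partially filled row equals B's chunking of row ++ remaining cells
lemma loopA_eq (noise : Bool) (w : Nat) (hw : 0 < w) :
    ∀ n (s : List Int), s.length ≤ n → ∀ (row lines : List String), row.length < w →
      reprLoopA noise w s row lines =
        lines ++ pvChunks w (row ++ (pvPairs s).map (fun p => pvFmtCell noise p.1 p.2)).length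
                               (row ++ (pvPairs s).map (fun p => pvFmtCell noise p.1 p.2)) := by
  have base : ∀ (row lines : List String), row.length < w →
      (if row.isEmpty then lines else lines ++ ["    " ++ PySem.Str.join "" row]) =
        lines ++ pvChunks w row.length row := by
    intro row lines hrow
    cases row with
    | nil => simp [pvChunks]
    | cons c cs =>
      rw [if_neg (by simp)]
      simp only [List.length_cons, pvChunks]
      rw [List.take_of_length_le (by simp at hrow ⊢; omega),
          List.drop_eq_nil_of_le (by simp at hrow ⊢; omega)]
      simp [pvChunks]
  intro n
  induction n with
  | zero =>
    intro s hs row lines hrow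
    have : s = [] := List.length_eq_zero_iff.mp (Nat.le_zero.mp hs)
    subst this
    simp only [pvPairs, List.map_nil, List.append_nil, reprLoopA]
    exact base row lines hrow
  | succ k ih =>
    intro s hs row lines hrow
    match s with
    | [] =>
      simp only [pvPairs, List.map_nil, List.append_nil, reprLoopA]
      exact base row lines hrow
    | [a] =>
      -- one trailing element: dropped by next()/next(), no cell produced
      simp only [pvPairs, List.map_nil, List.append_nil, reprLoopA]
      exact base row lines hrow
    | b1 :: b2 :: rest =>
      simp only [reprLoopA, pvPairs, List.map_cons]
      set c := pvFmtCell noise b1 b2 with hc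
      have hrest : rest.length ≤ k := by
        simp only [List.length_cons] at hs; omega
      by_cases hfl : w ≤ (row ++ [c]).length
      · rw [if_pos hfl]
        have hweq : (row ++ [c]).length = w := by
          simp only [List.length_append, List.length_cons, List.length_nil] at hfl ⊢
          omega
        rw [ih rest hrest [] _ hw]
        set cells := (pvPairs rest).map (fun p => pvFmtCell noise p.1 p.2) with hcells
        conv_rhs =>
          rw [show row ++ c :: cells = (row ++ [c]) ++ cells by simp]
        have hm : ((row ++ [c]) ++ cells).length = (w + cells.length - 1) + 1 := by
          simp only [List.length_append] at hweq ⊢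
          omega
        match hL : (row ++ [c]) ++ cells, hm with
        | d :: ds, hm =>
          rw [hm]
          simp only [pvChunks]
          rw [← hL, List.take_left' hweq, List.drop_left' hweq]
          rw [pvChunks_fuel w hw (w + cells.length - 1) cells.length cells (by omega) (le_refl _)]
          simp
      · rw [if_neg hfl]
        have hlt : (row ++ [c]).length < w := by omega
        rw [ih rest hrest (row ++ [c]) lines hlt]
        simp

-- B's index-advancing loop over cells is pvChunks of the not-yet-consumed suffix
lemma chunkB_eq_pvChunks (w : Nat) (hw : 0 < w) :
    ∀ fuel i (cells : List String), cells.length < fuel + i →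
      reprChunkB w fuel i cells = pvChunks w (cells.drop i).length (cells.drop i) := by
  intro fuel
  induction fuel with
  | zero =>
    intro i cells h
    rw [List.drop_eq_nil_of_le (by omega)]
    simp [reprChunkB, pvChunks]
  | succ k ih =>
    intro i cells h
    simp only [reprChunkB]
    by_cases hi : i < cells.length
    · rw [if_pos hi, PySem.List.slice_natCast]
      have hdrop : cells.drop i ≠ [] := by
        intro hnil
        have hld := List.length_drop (l := cells) (i := i)
        rw [hnil] at hld
        simp at hld; omega
      match hd : cells.drop i, hdrop with
      | c :: cs, _ =>
        have hlen : (c :: cs).length = cells.length - i := by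
          rw [← hd, List.length_drop]
        obtain ⟨m, hm⟩ : ∃ m, (c :: cs).length = m + 1 := ⟨cs.length, by simp⟩
        rw [hm]
        simp only [pvChunks]
        congr 1
        · rw [Nat.add_sub_cancel_left]
        · rw [ih (i + w) cells (by omega)]
          have hdw : List.drop (i + w) cells = List.drop w (c :: cs) := by
            rw [← hd, List.drop_drop]
          rw [hdw]
          refine pvChunks_fuel w hw _ m _ (le_refl _) ?_
          have hld : (List.drop w (c :: cs)).length = (c :: cs).length - w := List.length_drop
          omega
    · rw [if_neg hi]
      rw [List.drop_eq_nil_of_le (by omega)]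
      simp [pvChunks]

-- ===== VERDICT (by name: the statement is the Claim_ definition above) =====
theorem repr_sfx_spec : Claim_equal_repr_sfx := by
  intro s noise _
  unfold Spec_repr_sfx repr_sfx repr_sfx_alt
  simp only []
  have hw : 0 < (if noise = true then 7 else 8) := by cases noise <;> simp
  rw [loopA_eq noise _ hw s.length s (le_refl _) [] _ (by simpa using hw)]
  rw [chunkB_eq_pvChunks _ hw _ 0 _ (by omega)]
  simp
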